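-- pv_equiv track=rewrite | github.com/rivirside/quick | etrial/developability/viscosity.py | _count_charge_clusters
-- ===== SOURCE A (Python) =====
-- def _count_charge_clusters(sequence: str) -> int:
--     """
--     Count charge clusters (consecutive charged residues).
--
--     Args:
--         sequence: Protein sequence
--
--     Returns:
--         Number of charge clusters
--     """
--     clusters = 0
--     in_cluster = False
--     cluster_length = 0
--
--     for aa in sequence:
--         if aa in 'DEKR':  # Charged residues
--             cluster_length += 1
--             if cluster_length >= 3:  # Cluster threshold
--                 if not in_cluster:
--                     clusters += 1
--                     in_cluster = True
--         else:
--             cluster_length = 0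
--             in_cluster = False
--
--     return clusters
-- ===== SOURCE B (Python) =====
-- from itertools import groupby
--
--
-- def _count_charge_clusters(sequence: str) -> int:
--     """Count maximal runs of >=3 consecutive charged (DEKR) residues."""
--     return sum(
--         1
--         for charged, run in groupby(sequence, key=lambda aa: aa in 'DEKR')
--         if charged and sum(1 for _ in run) >= 3
--     )
-- ===== Notes on version B (the rewrite author's own statement) =====
-- stated objective: idiomatic
-- what changed: Replaced the inline in_cluster/cluster_length state machine with run segmentation via itertools.groupby, counting charged runs of length >= 3.
import Mathlib
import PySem

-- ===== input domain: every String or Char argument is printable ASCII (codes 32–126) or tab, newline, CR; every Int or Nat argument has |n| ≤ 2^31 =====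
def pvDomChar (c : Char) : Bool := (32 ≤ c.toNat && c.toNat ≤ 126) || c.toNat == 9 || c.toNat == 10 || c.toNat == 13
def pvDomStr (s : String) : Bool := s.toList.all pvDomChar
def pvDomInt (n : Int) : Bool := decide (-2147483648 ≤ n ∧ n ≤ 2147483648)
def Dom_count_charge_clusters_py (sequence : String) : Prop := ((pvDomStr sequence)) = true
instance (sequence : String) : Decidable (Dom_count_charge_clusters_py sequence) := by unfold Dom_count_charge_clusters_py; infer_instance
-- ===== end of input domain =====

-- B replaces A's inline in_cluster/cluster_length state machine by run segmentation
-- (groupby on charged-status), counting charged runs of length ≥ 3 (objective: idiomatic).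

-- ===== PORT A =====
-- loop body of A's for-loop; state = (clusters, in_cluster, cluster_length)
def pvStepA (st : Int × Bool × Int) (aa : Char) : Int × Bool × Int :=
  match st with
  | (clusters, in_cluster, cluster_length) =>
    if ("DEKR".toList.contains aa) then   -- `aa in 'DEKR'`: exact for a single char
      let cl := cluster_length + 1
      if cl ≥ 3 then
        if ¬ in_cluster then (clusters + 1, true, cl) else (clusters, in_cluster, cl)
      else (clusters, in_cluster, cl)
    else (clusters, false, 0)

def count_charge_clusters_py (sequence : String) : Int :=
  (sequence.toList.foldl pvStepA (0, false, 0)).1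

-- ===== PORT B =====
def pvCharged (aa : Char) : Bool := "DEKR".toList.contains aa  -- `aa in 'DEKR'`

-- groupby: length of the leading run with charged-status b, and the remainder
def pvSpan (b : Bool) : List Char → Nat × List Char
  | [] => (0, [])
  | a :: rest =>
    if pvCharged a = b then
      let p := pvSpan b rest
      (p.1 + 1, p.2)
    else (0, a :: rest)

lemma pvSpan_len (b : Bool) (l : List Char) : (pvSpan b l).2.length ≤ l.length := by
  induction l with
  | nil => simp [pvSpan]
  | cons a rest ih =>
    simp only [pvSpan]
    split
    · exact Nat.le_succ_of_le ih
    · simp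

-- sum over groupby: 1 per group with key True and length ≥ 3
def pvRuns : List Char → Int
  | [] => 0
  | a :: rest =>
    let p := pvSpan (pvCharged a) rest
    (if pvCharged a ∧ p.1 + 1 ≥ 3 then 1 else 0) + pvRuns p.2
termination_by l => l.length
decreasing_by exact Nat.lt_succ_of_le (pvSpan_len _ _)

def count_charge_clusters_py_alt (sequence : String) : Int :=
  pvRuns sequence.toList

-- ===== PRECONDITION & SPEC =====
def Spec_count_charge_clusters_py (sequence : String) (out : Int) : Prop := out = count_charge_clusters_py_alt sequence
instance (sequence : String) (out : Int) : Decidable (Spec_count_charge_clusters_py sequence out) := by unfold Spec_count_charge_clusters_py; infer_instance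

-- ===== CLAIM (what is proved, stated in full; the proofs are below) =====
def Claim_equal_count_charge_clusters_py : Prop := ∀ (sequence : String), Dom_count_charge_clusters_py sequence → Spec_count_charge_clusters_py sequence (count_charge_clusters_py sequence)

-- ===== LEMMAS AND PROOFS =====

-- A's loop ignores an uncharged prefix (state is reset on every uncharged char)
lemma foldl_span_false (l : List Char) (c : Int) :
    List.foldl pvStepA (c, false, 0) l
      = List.foldl pvStepA (c, false, 0) (pvSpan false l).2 := by
  induction l with
  | nil => rfl
  | cons a rest ih =>
    by_cases h : pvCharged a = false
    · have hsp : (pvSpan false (a :: rest)).2 = (pvSpan false rest).2 := by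
        simp [pvSpan, h]
      rw [hsp, ← ih, List.foldl_cons]
      simp [pvCharged] at h
      simp [pvStepA, h]
    · simp [pvSpan, h]

-- A's loop across a charged run: cluster_length goes k → k + n, clusters gains 1
-- exactly if the run first reaches length 3 inside this run
lemma foldl_span_true (l : List Char) (k : Nat) (c : Int) :
    List.foldl pvStepA (c, decide (3 ≤ k), (k : Int)) l
      = List.foldl pvStepA
          ((if k < 3 ∧ 3 ≤ k + (pvSpan true l).1 then c + 1 else c),
           decide (3 ≤ k + (pvSpan true l).1),
           ((k + (pvSpan true l).1 : Nat) : Int))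
          (pvSpan true l).2 := by
  induction l generalizing k c with
  | nil => simp [pvSpan]
  | cons a rest ih =>
    by_cases h : pvCharged a = true
    · have hsp : pvSpan true (a :: rest)
          = ((pvSpan true rest).1 + 1, (pvSpan true rest).2) := by
        simp [pvSpan, h]
      have step : pvStepA (c, decide (3 ≤ k), (k : Int)) a
          = ((if k < 3 ∧ 3 ≤ k + 1 then c + 1 else c), decide (3 ≤ k + 1), ((k + 1 : Nat) : Int)) := by
        simp [pvCharged] at h
        simp [pvStepA, h]
        split_ifs <;> simp_all <;> omega
      rw [hsp, List.foldl_cons, step, ih (k + 1)]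
      have e1 : k + 1 + (pvSpan true rest).1 = k + ((pvSpan true rest).1 + 1) := by omega
      rw [e1]
      have e2 : (if k + 1 < 3 ∧ 3 ≤ k + ((pvSpan true rest).1 + 1)
            then (if k < 3 ∧ 3 ≤ k + 1 then c + 1 else c) + 1
            else (if k < 3 ∧ 3 ≤ k + 1 then c + 1 else c))
          = (if k < 3 ∧ 3 ≤ k + ((pvSpan true rest).1 + 1) then c + 1 else c) := by
        split_ifs <;> omega
      rw [e2]
    · have hsp : pvSpan true (a :: rest) = (0, a :: rest) := by
        simp [pvSpan, h]
      have hc : ¬ (k < 3 ∧ 3 ≤ k) := by omega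
      rw [hsp]
      simp [hc]

-- the remainder of a span starts with the opposite status (or is empty)
lemma span_head (b : Bool) (l : List Char) :
    ∀ x r', (pvSpan b l).2 = x :: r' → pvCharged x ≠ b := by
  induction l with
  | nil => intro x r' h; simp [pvSpan] at h
  | cons a rest ih =>
    intro x r' h
    simp only [pvSpan] at h
    split at h
    · exact ih x r' h
    · rename_i hne
      injection h with h1 _
      subst h1; exact hne

-- the first iteration on an uncharged head (or no iteration at all) makes the
-- in_cluster/cluster_length components irrelevant for the final count
lemma foldl_reset (r : List Char) (c : Int) (b : Bool) (n : Int)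
    (h : r = [] ∨ ∃ x r', r = x :: r' ∧ pvCharged x = false) :
    (List.foldl pvStepA (c, b, n) r).1 = (List.foldl pvStepA (c, false, 0) r).1 := by
  rcases h with h | ⟨x, r', rfl, hx⟩
  · subst h; rfl
  · simp [List.foldl, pvStepA, pvCharged] at hx ⊢
    simp [hx]

-- main invariant: A's loop from a fresh state counts exactly B's runs
lemma main_lemma : ∀ (n : Nat) (l : List Char), l.length ≤ n → ∀ c : Int,
    (List.foldl pvStepA (c, false, 0) l).1 = c + pvRuns l := by
  intro n
  induction n with
  | zero =>
    intro l hl c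
    have : l = [] := List.eq_nil_of_length_eq_zero (Nat.le_zero.mp hl)
    subst this; simp [pvRuns]
  | succ n ih =>
    intro l hl c
    match l with
    | [] => simp [pvRuns]
    | a :: rest =>
      simp only [List.length_cons, Nat.succ_le_succ_iff] at hl
      by_cases h : pvCharged a = true
      · -- a charged run: use foldl_span_true from k = 0 on the whole list
        have hspan := foldl_span_true (a :: rest) 0 c
        have hsp : pvSpan true (a :: rest) = ((pvSpan true rest).1 + 1, (pvSpan true rest).2) := by
          simp [pvSpan, h]
        rw [hsp] at hspan
        simp only [Nat.zero_add] at hspan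
        have hhead : (pvSpan true rest).2 = [] ∨
            ∃ x r', (pvSpan true rest).2 = x :: r' ∧ pvCharged x = false := by
          cases hr : (pvSpan true rest).2 with
          | nil => exact Or.inl rfl
          | cons x r' =>
            refine Or.inr ⟨x, r', rfl, ?_⟩
            have := span_head true rest x r' hr
            simpa using this
        have hlen : (pvSpan true rest).2.length ≤ n :=
          le_trans (pvSpan_len true rest) hl
        have hnorm : (decide (3 ≤ 0)) = false := by decide
        rw [show ((0:Nat):Int) = (0:Int) by rfl] at hspan
        rw [hnorm] at hspan
        rw [hspan, foldl_reset _ _ _ _ hhead, ih _ hlen]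
        simp only [pvRuns, h]
        split_ifs with h1 h2 h2 <;> simp_all <;> omega
      · -- an uncharged run: the loop state stays fresh across it
        have hstep : List.foldl pvStepA (c, false, 0) (a :: rest)
            = List.foldl pvStepA (c, false, 0) rest := by
          simp [List.foldl, pvStepA, pvCharged] at h ⊢
          simp [h]
        have hspan := foldl_span_false rest c
        have hlen : (pvSpan false rest).2.length ≤ n :=
          le_trans (pvSpan_len false rest) hl
        rw [hstep, hspan, ih _ hlen]
        simp only [pvRuns]
        have h' : pvCharged a = false := by simpa using h
        simp [h']

-- ===== VERDICT (by name: the statement is the Claim_ definition above) =====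
theorem count_charge_clusters_py_spec : Claim_equal_count_charge_clusters_py := by
  intro sequence _
  unfold Spec_count_charge_clusters_py count_charge_clusters_py count_charge_clusters_py_alt
  have := main_lemma sequence.toList.length sequence.toList le_rfl 0
  simpa using this
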